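-- pv_equiv track=rewrite | github.com/abrytskyy/PYTHON-Exercises | Full Stack/06.18hw.py | sum_plus_mult_minus
-- ===== SOURCE A (Python) =====
-- def sum_plus_mult_minus(a):
--     sum = 0
--     mult = 1
--     for i in a:
--         if i > 0:
--             sum += i
--         elif i < 0:
--             mult *= i
--     return sum, mult
-- ===== SOURCE B (Python) =====
-- def sum_plus_mult_minus(a):
--     # divide and conquer: combine (sum of positives, product of negatives) of the two halves
--     if not a:
--         return 0, 1
--     if len(a) == 1:
--         x = a[0]
--         if x > 0:
--             return x, 1
--         if x < 0:
--             return 0, x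
--         return 0, 1
--     mid = len(a) // 2
--     s1, p1 = sum_plus_mult_minus(a[:mid])
--     s2, p2 = sum_plus_mult_minus(a[mid:])
--     return s1 + s2, p1 * p2
-- ===== Notes on version B (the rewrite author's own statement) =====
-- stated objective: alternative
-- what changed: Replaces A's single left-to-right branching loop with two accumulators by a divide-and-conquer recursion that splits the list at the midpoint, recursively computes (sum of positives, product of negatives) for each half and combines them; correct because both aggregates are associative-commutative reductions.
import Mathlib
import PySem

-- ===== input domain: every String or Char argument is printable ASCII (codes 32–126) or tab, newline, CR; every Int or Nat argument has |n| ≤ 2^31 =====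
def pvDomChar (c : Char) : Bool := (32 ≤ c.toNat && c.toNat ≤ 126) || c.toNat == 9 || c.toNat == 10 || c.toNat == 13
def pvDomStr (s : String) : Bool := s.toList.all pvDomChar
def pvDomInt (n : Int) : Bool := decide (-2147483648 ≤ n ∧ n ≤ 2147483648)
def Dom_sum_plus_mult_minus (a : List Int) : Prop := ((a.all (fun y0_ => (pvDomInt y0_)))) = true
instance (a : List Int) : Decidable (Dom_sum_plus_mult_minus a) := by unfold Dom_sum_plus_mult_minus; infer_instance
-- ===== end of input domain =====

-- B replaces A's single branching loop by a midpoint divide-and-conquer recursion (objective: alternative).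

-- ===== PORT A =====
def sum_plus_mult_minus (a : List Int) : Int × Int :=
  let st := a.foldl (fun (st : Int × Int) i =>
    if i > 0 then (st.1 + i, st.2)
    else if i < 0 then (st.1, st.2 * i)
    else st) (0, 1)
  (st.1, st.2)

-- ===== PORT B =====
-- a[:mid] / a[mid:] with 0 ≤ mid ≤ len(a) are exactly List.take / List.drop.
def sum_plus_mult_minus_alt (a : List Int) : Int × Int :=
  match a with
  | [] => (0, 1)
  | [x] => if x > 0 then (x, 1) else if x < 0 then (0, x) else (0, 1)
  | x :: y :: t =>
    let mid := (x :: y :: t).length / 2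
    let r1 := sum_plus_mult_minus_alt ((x :: y :: t).take mid)
    let r2 := sum_plus_mult_minus_alt ((x :: y :: t).drop mid)
    (r1.1 + r2.1, r1.2 * r2.2)
termination_by a.length
decreasing_by
  · simp [List.length_take]; omega
  · simp; omega

-- ===== PRECONDITION & SPEC =====
def Spec_sum_plus_mult_minus (a : List Int) (out : Int × Int) : Prop := out = sum_plus_mult_minus_alt a
instance (a : List Int) (out : Int × Int) : Decidable (Spec_sum_plus_mult_minus a out) := by unfold Spec_sum_plus_mult_minus; infer_instance

-- ===== CLAIM (what is proved, stated in full; the proofs are below) =====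
def Claim_equal_sum_plus_mult_minus : Prop := ∀ (a : List Int), Dom_sum_plus_mult_minus a → Spec_sum_plus_mult_minus a (sum_plus_mult_minus a)

-- ===== LEMMAS AND PROOFS =====

-- A's fold, characterised: it adds the sum of the positives and multiplies by the product of the negatives.
theorem spmm_fold (a : List Int) (s m : Int) :
    a.foldl (fun (st : Int × Int) i =>
      if i > 0 then (st.1 + i, st.2)
      else if i < 0 then (st.1, st.2 * i)
      else st) (s, m)
    = (s + (a.filter (fun x => x > 0)).sum, m * (a.filter (fun x => x < 0)).prod) := by
  induction a generalizing s m with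
  | nil => simp
  | cons h t ih =>
    by_cases h1 : h > 0
    · have h2 : ¬ h < 0 := by omega
      simp [h1, h2, ih]; ring
    · by_cases h2 : h < 0
      · simp [h1, h2, ih]; ring
      · simp [h1, h2, ih]

-- B's recursion computes the same pair.
theorem spmm_alt_eq (a : List Int) :
    sum_plus_mult_minus_alt a
      = ((a.filter (fun x => x > 0)).sum, (a.filter (fun x => x < 0)).prod) := by
  induction hn : a.length using Nat.strong_induction_on generalizing a with
  | _ n ih =>
    match a with
    | [] => simp [sum_plus_mult_minus_alt]
    | [x] =>
      by_cases h1 : x > 0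
      · have h2 : ¬ x < 0 := by omega
        simp [sum_plus_mult_minus_alt, h1, h2]
      · by_cases h2 : x < 0
        · simp [sum_plus_mult_minus_alt, h1, h2]
        · simp [sum_plus_mult_minus_alt, h1, h2]
    | x :: y :: t =>
      subst hn
      rw [sum_plus_mult_minus_alt]
      have l1 : ((x :: y :: t).take ((x :: y :: t).length / 2)).length < (x :: y :: t).length := by
        simp [List.length_take]; omega
      have l2 : ((x :: y :: t).drop ((x :: y :: t).length / 2)).length < (x :: y :: t).length := by
        simp; omega
      rw [ih _ l1 _ rfl, ih _ l2 _ rfl]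
      have h := List.take_append_drop ((x :: y :: t).length / 2) (x :: y :: t)
      dsimp only
      refine Prod.ext ?_ ?_
      · dsimp only
        rw [← List.sum_append, ← List.filter_append, h]
      · dsimp only
        rw [← List.prod_append, ← List.filter_append, h]

-- ===== VERDICT (by name: the statement is the Claim_ definition above) =====
theorem sum_plus_mult_minus_spec : Claim_equal_sum_plus_mult_minus := by
  intro a _
  unfold Spec_sum_plus_mult_minus sum_plus_mult_minus
  simp [spmm_fold, spmm_alt_eq]
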